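-- pv_equiv track=rewrite | github.com/rama1991-bit/parallax-backend | app/services/event_clustering.py | _rank_matched_terms
-- ===== SOURCE A (Python) =====
-- CROSS_LANGUAGE_PREFIX = "xlang_"
--
-- def _display_term(term: str) -> str:
--     value = str(term or "")
--     if value.startswith(CROSS_LANGUAGE_PREFIX):
--         value = value.removeprefix(CROSS_LANGUAGE_PREFIX)
--     return value.replace("_", " ")
--
-- def _bridge_terms(terms: set[str]) -> set[str]:
--     return {term for term in terms if str(term).startswith(CROSS_LANGUAGE_PREFIX)}
--
-- def _rank_matched_terms(terms: set[str], limit: int = 12) -> list[str]: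
--     bridge = sorted(_display_term(term) for term in _bridge_terms(terms))
--     lexical = sorted(_display_term(term) for term in terms if term not in _bridge_terms(terms))
--     ordered = []
--     for value in [*bridge, *lexical]:
--         if value and value not in ordered:
--             ordered.append(value)
--         if len(ordered) >= limit:
--             break
--     return ordered
-- ===== SOURCE B (Python) =====
-- CROSS_LANGUAGE_PREFIX = "xlang_"
--
--
-- def _display_term(term: str) -> str:
--     value = str(term or "")
--     if value.startswith(CROSS_LANGUAGE_PREFIX):
--         value = value.removeprefix(CROSS_LANGUAGE_PREFIX)
--     return value.replace("_", " ")
--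
--
-- def _rank_matched_terms(terms: set[str], limit: int = 12) -> list[str]:
--     keyed = sorted(
--         (0 if str(term).startswith(CROSS_LANGUAGE_PREFIX) else 1, _display_term(term))
--         for term in terms
--     )
--     seen = set()
--     ordered = []
--     for _, value in keyed:
--         if value and value not in seen:
--             seen.add(value)
--             ordered.append(value)
--         if len(ordered) >= limit:
--             break
--     return ordered
-- ===== Notes on version B (the rewrite author's own statement) =====
-- stated objective: alternative
-- what changed: A partitions the set into bridge/non-bridge, sorts each display list separately and dedups by scanning the output list; B maps every term once to a composite key (bridge-flag, display), sorts that pair list a single time, and dedups in one pass with a seen-set.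
import Mathlib
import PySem

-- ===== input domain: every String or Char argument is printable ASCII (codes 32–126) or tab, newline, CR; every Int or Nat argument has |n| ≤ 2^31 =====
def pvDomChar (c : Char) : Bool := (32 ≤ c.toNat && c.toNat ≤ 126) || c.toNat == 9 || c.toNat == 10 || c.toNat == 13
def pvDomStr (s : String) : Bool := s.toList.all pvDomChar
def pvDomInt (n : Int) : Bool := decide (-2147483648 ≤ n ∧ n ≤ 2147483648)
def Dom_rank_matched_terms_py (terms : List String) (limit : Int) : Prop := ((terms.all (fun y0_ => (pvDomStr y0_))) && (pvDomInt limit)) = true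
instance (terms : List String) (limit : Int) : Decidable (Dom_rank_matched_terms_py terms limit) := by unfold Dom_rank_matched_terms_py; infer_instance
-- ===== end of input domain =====

-- B replaces A's partition-into-two-lists-and-two-sorts by ONE sort under the composite key
-- (bridge-flag, display) plus a single dedup pass with a seen-set (objective: alternative decomposition).

-- ===== PORT A =====

-- _display_term(term); 'str(term or "")' is the identity on a str argument ('' stays ''),
-- 'removeprefix' inside the startswith branch is value[6:]
def display_py (term : String) : String :=
  let value := term
  let value := if PySem.Str.startswith value "xlang_" then PySem.Str.slice value (some 6) none else value
  PySem.Str.replace value "_" " "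

-- _bridge_terms(terms): the set comprehension over the set 'terms'
def bridge_terms_py (terms : List String) : PySem.Set String :=
  PySem.Set.ofList (terms.filter (fun term => PySem.Str.startswith term "xlang_"))

-- the 'for value in [*bridge, *lexical]' loop with its dedup test and 'len(ordered) >= limit' break
def rank_loop_py (limit : Int) : List String → List String → List String
  | [], ordered => ordered
  | value :: rest, ordered =>
    let ordered := if value ≠ "" ∧ value ∉ ordered then ordered ++ [value] else ordered
    if limit ≤ (ordered.length : Int) then ordered
    else rank_loop_py limit rest ordered

def rank_matched_terms_py (terms : List String) (limit : Int) : List String :=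
  let bridge := PySem.List.sorted ((bridge_terms_py terms).map display_py) (fun x => x) false
  let lexical := PySem.List.sorted
    ((terms.filter (fun term => !(PySem.Set.contains (bridge_terms_py terms) term))).map display_py)
    (fun x => x) false
  rank_loop_py limit (bridge ++ lexical) []

-- ===== PORT B =====

-- B's single dedup pass over the keyed, sorted pairs, with a 'seen' set
def alt_loop (limit : Int) : List (Int × String) → PySem.Set String → List String → List String
  | [], _, ordered => ordered
  | kv :: rest, seen, ordered =>
    let st := if kv.2 ≠ "" ∧ ¬ (PySem.Set.contains seen kv.2 = true)
              then (PySem.Set.add seen kv.2, ordered ++ [kv.2]) else (seen, ordered)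
    if limit ≤ (st.2.length : Int) then st.2
    else alt_loop limit rest st.1 st.2

def rank_matched_terms_py_alt (terms : List String) (limit : Int) : List String :=
  let keyed := PySem.List.sorted2
    (terms.map (fun term => ((if PySem.Str.startswith term "xlang_" then (0 : Int) else 1), display_py term)))
    Prod.fst Prod.snd false
  alt_loop limit keyed PySem.Set.empty []

-- ===== PRECONDITION & SPEC =====

-- Pre_: 'terms' is a Python set, so per the type convention the list holds DISTINCT elements;
-- Pre_ states exactly that (it excludes no set-typed input A accepts).
def Pre_rank_matched_terms_py (terms : List String) (limit : Int) : Prop := terms.Nodup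
instance (terms : List String) (limit : Int) : Decidable (Pre_rank_matched_terms_py terms limit) := by unfold Pre_rank_matched_terms_py; infer_instance

def pvWitness_rank_matched_terms_py : List String × Int := (["xlang_neural_link", "graph_db", ""], 12)

def Spec_rank_matched_terms_py (terms : List String) (limit : Int) (out : List String) : Prop := out = rank_matched_terms_py_alt terms limit
instance (terms : List String) (limit : Int) (out : List String) : Decidable (Spec_rank_matched_terms_py terms limit out) := by unfold Spec_rank_matched_terms_py; infer_instance

-- ===== CLAIM (what is proved, stated in full; the proofs are below) =====
def Claim_equal_rank_matched_terms_py : Prop := ∀ (terms : List String) (limit : Int), Dom_rank_matched_terms_py terms limit → Pre_rank_matched_terms_py terms limit → Spec_rank_matched_terms_py terms limit (rank_matched_terms_py terms limit)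

-- ===== LEMMAS AND PROOFS =====

-- B's loop with 'seen' = the output list is A's loop over the second components
theorem alt_loop_eq_rank_loop (limit : Int) (ps : List (Int × String)) (acc : List String) :
    alt_loop limit ps acc acc = rank_loop_py limit (ps.map Prod.snd) acc := by
  induction ps generalizing acc with
  | nil => rfl
  | cons kv rest ih =>
    simp only [alt_loop, rank_loop_py, List.map_cons]
    by_cases h : kv.2 ≠ "" ∧ kv.2 ∉ acc
    · have hc : ¬ (PySem.Set.contains acc kv.2 = true) := by
        simp only [PySem.Set.contains, List.contains_eq_mem, decide_eq_true_eq]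
        exact h.2
      have hadd : PySem.Set.add acc kv.2 = acc ++ [kv.2] := by
        simp only [PySem.Set.add, if_neg hc]
      rw [if_pos (⟨h.1, hc⟩ : kv.2 ≠ "" ∧ ¬ (PySem.Set.contains acc kv.2 = true)), if_pos h, hadd]
      dsimp only
      by_cases hl : limit ≤ ((acc ++ [kv.2]).length : Int)
      · rw [if_pos hl, if_pos hl]
      · rw [if_neg hl, if_neg hl]
        exact ih (acc ++ [kv.2])
    · have h' : ¬ (kv.2 ≠ "" ∧ ¬ (PySem.Set.contains acc kv.2 = true)) := by
        simp only [PySem.Set.contains, List.contains_eq_mem, decide_eq_true_eq]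
        tauto
      rw [if_neg h', if_neg h]
      dsimp only
      by_cases hl : limit ≤ (acc.length : Int)
      · rw [if_pos hl, if_pos hl]
      · rw [if_neg hl, if_neg hl]
        exact ih acc

-- sorting pairs by the tuple key IS sorting under the lexicographic order on Int ×ₗ String
theorem sorted2_eq_sorted_lex (xs : List (Int × String)) :
    PySem.List.sorted2 xs Prod.fst Prod.snd false
      = PySem.List.sorted xs (fun p => toLex p) false := by
  unfold PySem.List.sorted2 PySem.List.sorted
  simp only [Bool.false_eq_true, if_false, if_neg]
  congr 1
  funext acc x
  congr 1
  funext a b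
  rcases lt_trichotomy a.1 b.1 with h | h | h
  · simp [Prod.Lex.lt_iff, h]
  · simp [Prod.Lex.lt_iff, h, lt_irrefl]
  · simp [Prod.Lex.lt_iff, h, not_lt.mpr (le_of_lt h), h.ne']

-- folding Set.add over a nodup list of fresh elements appends it
theorem foldl_add_of_nodup_fresh (xs : List String) (s : PySem.Set String)
    (hf : ∀ x ∈ xs, x ∉ s) (hn : xs.Nodup) :
    xs.foldl PySem.Set.add s = s ++ xs := by
  induction xs generalizing s with
  | nil => simp
  | cons x rest ih =>
    have hx : PySem.Set.add s x = s ++ [x] := by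
      have : ¬ (PySem.Set.contains s x = true) := by
        simp only [PySem.Set.contains, List.contains_eq_mem, decide_eq_true_eq]
        exact hf x (by simp)
      simp only [PySem.Set.add, if_neg this]
    have hrest : ∀ y ∈ rest, y ∉ s ++ [x] := by
      intro y hy
      have hyx : y ≠ x := fun e => (List.nodup_cons.mp hn).1 (e ▸ hy)
      have := hf y (List.mem_cons_of_mem _ hy)
      simp [hyx, this]
    calc (x :: rest).foldl PySem.Set.add s = rest.foldl PySem.Set.add (s ++ [x]) := by
          simp [List.foldl_cons, hx]
      _ = (s ++ [x]) ++ rest := ih _ hrest (List.nodup_cons.mp hn).2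
      _ = s ++ (x :: rest) := by simp

theorem ofList_eq_self_of_nodup (xs : List String) (hn : xs.Nodup) :
    PySem.Set.ofList xs = xs := by
  simpa [PySem.Set.ofList, PySem.Set.empty] using
    foldl_add_of_nodup_fresh xs [] (by simp) hn

-- the sorted keyed pair list splits into the bridge block then the lexical block
theorem sorted_pairs_split (terms : List String) :
    PySem.List.sorted
      (terms.map (fun term => ((if PySem.Str.startswith term "xlang_" then (0 : Int) else 1), display_py term)))
      (fun p => toLex p) false
    = ((PySem.List.sorted ((terms.filter (fun t => PySem.Str.startswith t "xlang_")).map display_py) (fun x => x) false).map (fun d => ((0 : Int), d)))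
      ++ ((PySem.List.sorted ((terms.filter (fun t => !PySem.Str.startswith t "xlang_")).map display_py) (fun x => x) false).map (fun d => ((1 : Int), d))) := by
  apply PySem.List.eq_of_perm_of_pairwise_le_of_injective (key := fun p : Int × String => toLex p)
  · exact fun a b h => toLex.injective h
  · -- both sides are permutations of the keyed pair list
    refine (PySem.List.sorted_perm _ _ _).trans ?_
    have hsplit := ((List.filter_append_perm (fun t => PySem.Str.startswith t "xlang_") terms).map
      (fun term => ((if PySem.Str.startswith term "xlang_" then (0 : Int) else 1), display_py term))).symm
    rw [List.map_append] at hsplit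
    refine hsplit.trans (List.Perm.append ?_ ?_)
    · have he : (terms.filter (fun t => PySem.Str.startswith t "xlang_")).map
          (fun term => ((if PySem.Str.startswith term "xlang_" then (0 : Int) else 1), display_py term))
          = ((terms.filter (fun t => PySem.Str.startswith t "xlang_")).map display_py).map (fun d => ((0 : Int), d)) := by
        rw [List.map_map]
        apply List.map_congr_left
        intro t ht
        have hsw := List.of_mem_filter ht
        simp only [Function.comp_apply]
        rw [if_pos hsw]
      rw [he]
      exact ((PySem.List.sorted_perm _ _ _).map _).symm
    · have he : (terms.filter (fun t => !PySem.Str.startswith t "xlang_")).map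
          (fun term => ((if PySem.Str.startswith term "xlang_" then (0 : Int) else 1), display_py term))
          = ((terms.filter (fun t => !PySem.Str.startswith t "xlang_")).map display_py).map (fun d => ((1 : Int), d)) := by
        rw [List.map_map]
        apply List.map_congr_left
        intro t ht
        have hsw : PySem.Str.startswith t "xlang_" = false := by
          have := List.of_mem_filter ht
          simp only [Bool.not_eq_true'] at this
          exact this
        simp only [Function.comp_apply]
        rw [if_neg (by rw [hsw]; simp)]
      rw [he]
      exact ((PySem.List.sorted_perm _ _ _).map _).symm
  · exact PySem.List.sorted_pairwise _ _
  · -- the right-hand side is ≤-sorted under the lexicographic key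
    rw [List.pairwise_append]
    refine ⟨?_, ?_, ?_⟩
    · rw [List.pairwise_map]
      refine (PySem.List.sorted_pairwise ((terms.filter (fun t => PySem.Str.startswith t "xlang_")).map display_py)
        (fun x : String => x)).imp ?_
      intro a b h
      exact Prod.Lex.le_iff.mpr (Or.inr ⟨rfl, h⟩)
    · rw [List.pairwise_map]
      refine (PySem.List.sorted_pairwise ((terms.filter (fun t => !PySem.Str.startswith t "xlang_")).map display_py)
        (fun x : String => x)).imp ?_
      intro a b h
      exact Prod.Lex.le_iff.mpr (Or.inr ⟨rfl, h⟩)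
    · intro a ha b hb
      simp only [List.mem_map] at ha hb
      obtain ⟨x, -, rfl⟩ := ha
      obtain ⟨y, -, rfl⟩ := hb
      exact Prod.Lex.le_iff.mpr (Or.inl (by norm_num))

-- ===== VERDICT (by name: the statement is the Claim_ definition above) =====
theorem rank_matched_terms_py_spec : Claim_equal_rank_matched_terms_py := by
  intro terms limit _ hpre
  unfold Spec_rank_matched_terms_py rank_matched_terms_py rank_matched_terms_py_alt
  rw [sorted2_eq_sorted_lex, sorted_pairs_split]
  rw [show (PySem.Set.empty : PySem.Set String) = ([] : List String) from rfl,
      alt_loop_eq_rank_loop]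
  have h1 : bridge_terms_py terms = terms.filter (fun t => PySem.Str.startswith t "xlang_") := by
    unfold bridge_terms_py
    exact ofList_eq_self_of_nodup _ (hpre.filter _)
  have h2 : terms.filter (fun term => !(PySem.Set.contains (bridge_terms_py terms) term))
      = terms.filter (fun t => !PySem.Str.startswith t "xlang_") := by
    apply List.filter_congr
    intro t ht
    simp [h1, PySem.Set.contains, List.contains_eq_mem, List.mem_filter, ht]
  rw [h2, h1]
  simp [Function.comp]
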